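-- pv_equiv track=rewrite | github.com/NNTin/towncord | .github/scripts/post_ci_report.py | skip_npm_boilerplate
-- ===== SOURCE A (Python) =====
-- def skip_npm_boilerplate(lines: list[str]) -> list[str]:
--     """Drop leading npm ">" header lines and leading blank lines."""
--     result = []
--     started = False
--     for line in lines:
--         if not started:
--             if line.startswith(">") or line.strip() == "":
--                 continue
--             started = True
--         result.append(line)
--     return result
-- ===== SOURCE B (Python) =====
-- def skip_npm_boilerplate(lines: list[str]) -> list[str]:
--     """Drop leading npm ">" header lines and leading blank lines."""
--     i = 0
--     n = len(lines)
--     while i < n and (lines[i].startswith(">") or lines[i].strip() == ""):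
--         i += 1
--     return lines[i:]
-- ===== Notes on version B (the rewrite author's own statement) =====
-- stated objective: idiomatic
-- what changed: A maintains a (result list, started flag) pair and appends every kept line one by one; B maintains only an integer cursor that locates the first non-boilerplate line and returns the slice lines[i:] in one step, never appending per line.
import Mathlib
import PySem

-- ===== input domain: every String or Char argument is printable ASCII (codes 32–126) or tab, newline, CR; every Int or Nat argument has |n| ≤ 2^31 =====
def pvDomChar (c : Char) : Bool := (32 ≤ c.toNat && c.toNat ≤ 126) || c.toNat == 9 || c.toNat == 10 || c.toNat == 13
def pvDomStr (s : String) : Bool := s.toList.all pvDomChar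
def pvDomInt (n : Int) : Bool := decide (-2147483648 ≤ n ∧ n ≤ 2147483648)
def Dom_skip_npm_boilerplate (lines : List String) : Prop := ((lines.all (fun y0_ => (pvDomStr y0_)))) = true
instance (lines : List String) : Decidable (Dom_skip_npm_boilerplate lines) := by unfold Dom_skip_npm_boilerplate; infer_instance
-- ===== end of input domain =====

-- B replaces A's (result list, started flag) accumulator loop by an index search plus one slice (idiomatic; same cost).

-- ===== PORT A =====
-- A: loop with a `started` flag, appending each kept line to `result`.
def skip_npm_boilerplate (lines : List String) : List String :=
  (lines.foldl (fun (st : List String × Bool) line =>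
      if !st.2 then
        if PySem.Str.startswith line ">" || PySem.Str.strip line == "" then st
        else (st.1 ++ [line], true)
      else (st.1 ++ [line], st.2))
    ([], false)).1

-- ===== PORT B =====
-- B's while loop advances an integer cursor `i` through the leading boilerplate
-- (stopping at the first line that is neither); the recursion below is that loop.
def pv_skip_idx (lines : List String) : Nat :=
  match lines with
  | [] => 0
  | l :: ls =>
    if PySem.Str.startswith l ">" || PySem.Str.strip l == "" then pv_skip_idx ls + 1
    else 0

-- B: return the slice lines[i:] (i is a Nat with 0 ≤ i ≤ len, so the slice is List.drop i).
def skip_npm_boilerplate_alt (lines : List String) : List String :=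
  lines.drop (pv_skip_idx lines)

-- ===== PRECONDITION & SPEC =====
def Spec_skip_npm_boilerplate (lines : List String) (out : List String) : Prop := out = skip_npm_boilerplate_alt lines
instance (lines : List String) (out : List String) : Decidable (Spec_skip_npm_boilerplate lines out) := by unfold Spec_skip_npm_boilerplate; infer_instance

-- ===== CLAIM (what is proved, stated in full; the proofs are below) =====
def Claim_equal_skip_npm_boilerplate : Prop := ∀ (lines : List String), Dom_skip_npm_boilerplate lines → Spec_skip_npm_boilerplate lines (skip_npm_boilerplate lines)

-- ===== LEMMAS AND PROOFS =====
-- Once started = true, A appends every remaining line.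
theorem pv_foldl_started (lines : List String) (acc : List String) :
    (lines.foldl (fun (st : List String × Bool) line =>
        if !st.2 then
          if PySem.Str.startswith line ">" || PySem.Str.strip line == "" then st
          else (st.1 ++ [line], true)
        else (st.1 ++ [line], st.2))
      (acc, true)).1 = acc ++ lines := by
  induction lines generalizing acc with
  | nil => simp
  | cons x xs ih => simpa using ih (acc ++ [x])

-- Before starting, A skips exactly the pv_skip_idx prefix, i.e. produces the drop.
theorem pv_foldl_notStarted (lines : List String) (acc : List String) :
    (lines.foldl (fun (st : List String × Bool) line =>
        if !st.2 then
          if PySem.Str.startswith line ">" || PySem.Str.strip line == "" then st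
          else (st.1 ++ [line], true)
        else (st.1 ++ [line], st.2))
      (acc, false)).1
    = acc ++ lines.drop (pv_skip_idx lines) := by
  induction lines generalizing acc with
  | nil => simp
  | cons x xs ih =>
    by_cases h : PySem.Chars.startswith x.toList ['>'] = true ∨ PySem.Str.strip x = ""
    · simpa [pv_skip_idx, h] using ih acc
    · simpa [pv_skip_idx, h] using pv_foldl_started xs (acc ++ [x])

-- ===== VERDICT (by name: the statement is the Claim_ definition above) =====
theorem skip_npm_boilerplate_spec : Claim_equal_skip_npm_boilerplate := by
  intro lines _
  show _ = _
  simpa [skip_npm_boilerplate, skip_npm_boilerplate_alt] using pv_foldl_notStarted lines []
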